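-- pv_equiv track=rewrite | github.com/0choki0/algo | 프로그래머스/0/181890. 왼쪽 오른쪽/왼쪽 오른쪽.py | solution
-- ===== SOURCE A (Python) =====
-- def solution(str_list):
--     answer = []
--     for str in str_list:
--         if str == 'l':
--             return answer
--             break
--         elif str == 'r':
--             return str_list[len(answer)+1:]
--             break
--         else:
--             answer.append(str)
--     return []
-- ===== SOURCE B (Python) =====
-- def solution(str_list):
--     n = len(str_list)
--     li = str_list.index('l') if 'l' in str_list else n
--     ri = str_list.index('r') if 'r' in str_list else n
--     if li == n and ri == n:
--         return []
--     return str_list[:li] if li < ri else str_list[ri+1:]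
-- ===== Notes on version B (the rewrite author's own statement) =====
-- stated objective: simpler
-- what changed: Replaces the accumulate-and-short-circuit loop with two positional probes (first index of 'l' and of 'r') followed by a comparison and a single slice.
import Mathlib
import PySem

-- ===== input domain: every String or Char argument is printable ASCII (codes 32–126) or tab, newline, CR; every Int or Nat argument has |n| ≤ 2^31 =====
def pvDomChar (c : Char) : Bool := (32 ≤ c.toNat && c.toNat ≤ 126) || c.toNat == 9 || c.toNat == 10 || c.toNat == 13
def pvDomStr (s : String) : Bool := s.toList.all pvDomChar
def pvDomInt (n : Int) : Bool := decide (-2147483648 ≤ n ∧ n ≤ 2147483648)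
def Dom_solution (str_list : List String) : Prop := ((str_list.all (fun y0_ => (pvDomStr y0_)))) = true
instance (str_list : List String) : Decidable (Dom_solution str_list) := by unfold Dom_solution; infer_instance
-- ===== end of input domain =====

-- B replaces A's accumulate-and-short-circuit loop by two positional probes (first index of "l"/"r") plus one slice (objective: simpler).

-- ===== PORT A =====
def solGo (orig : List String) (answer : List String) : List String → List String
  | [] => []
  | s :: rest =>
    if s = "l" then answer
    else if s = "r" then PySem.List.slice orig (some ((answer.length : Int) + 1)) none
    else solGo orig (answer ++ [s]) rest

def solution (str_list : List String) : List String := solGo str_list [] str_list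

-- ===== PORT B =====
def solution_alt (str_list : List String) : List String :=
  let n := str_list.length
  let li := (PySem.List.index? str_list "l").getD n
  let ri := (PySem.List.index? str_list "r").getD n
  if li = n ∧ ri = n then []
  else if li < ri then PySem.List.slice str_list none (some (li : Int))
  else PySem.List.slice str_list (some ((ri : Int) + 1)) none

-- ===== PRECONDITION & SPEC =====
def Spec_solution (str_list : List String) (out : List String) : Prop := out = solution_alt str_list
instance (str_list : List String) (out : List String) : Decidable (Spec_solution str_list out) := by unfold Spec_solution; infer_instance

-- ===== CLAIM (what is proved, stated in full; the proofs are below) =====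
def Claim_equal_solution : Prop := ∀ (str_list : List String), Dom_solution str_list → Spec_solution str_list (solution str_list)

-- ===== LEMMAS AND PROOFS =====

lemma index?_append_not_mem (pre suf : List String) (v : String) (h : v ∉ pre) :
    PySem.List.index? (pre ++ suf) v = (PySem.List.index? suf v).map (· + pre.length) := by
  induction pre with
  | nil =>
    rw [List.nil_append]
    cases PySem.List.index? suf v <;> simp
  | cons x xs ih =>
    simp only [List.mem_cons, not_or] at h
    rw [List.cons_append, PySem.List.index?_cons_of_ne _ (Ne.symm h.1), ih h.2]
    cases PySem.List.index? suf v <;> simp <;> omega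

lemma main_lemma (l acc : List String) (hl : "l" ∉ acc) (hr : "r" ∉ acc) :
    solGo (acc ++ l) acc l = solution_alt (acc ++ l) := by
  induction l generalizing acc with
  | nil =>
    have h1 : PySem.List.index? (acc ++ ([] : List String)) "l" = none :=
      (PySem.List.index?_eq_none_iff _ _).mpr (by simpa using hl)
    have h2 : PySem.List.index? (acc ++ ([] : List String)) "r" = none :=
      (PySem.List.index?_eq_none_iff _ _).mpr (by simpa using hr)
    unfold solution_alt
    rw [h1, h2]
    simp [solGo]
  | cons s rest ih =>
    by_cases hsl : s = "l"
    · subst hsl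
      have hA : solGo (acc ++ "l" :: rest) acc ("l" :: rest) = acc := by simp [solGo]
      have hli : PySem.List.index? (acc ++ "l" :: rest) "l" = some acc.length := by
        rw [index?_append_not_mem _ _ _ hl, PySem.List.index?_cons_self]; simp
      have hri : acc.length <
          ((PySem.List.index? (acc ++ "l" :: rest) "r").getD (acc ++ "l" :: rest).length) := by
        rw [index?_append_not_mem _ _ _ hr, PySem.List.index?_cons_of_ne _ (by decide)]
        cases PySem.List.index? rest "r" <;> simp
      have hlen : acc.length < (acc ++ "l" :: rest).length := by simp
      rw [hA]
      simp only [solution_alt, hli, Option.getD_some]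
      rw [if_neg (by omega), if_pos hri, PySem.List.slice_to_natCast]
      simp
    · by_cases hsr : s = "r"
      · subst hsr
        have hA : solGo (acc ++ "r" :: rest) acc ("r" :: rest) =
            PySem.List.slice (acc ++ "r" :: rest) (some ((acc.length : Int) + 1)) none := by
          simp [solGo]
        have hri : PySem.List.index? (acc ++ "r" :: rest) "r" = some acc.length := by
          rw [index?_append_not_mem _ _ _ hr, PySem.List.index?_cons_self]; simp
        have hli : acc.length <
            ((PySem.List.index? (acc ++ "r" :: rest) "l").getD (acc ++ "r" :: rest).length) := by
          rw [index?_append_not_mem _ _ _ hl, PySem.List.index?_cons_of_ne _ (by decide)]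
          cases PySem.List.index? rest "l" <;> simp
        have hlen : acc.length < (acc ++ "r" :: rest).length := by simp
        rw [hA]
        simp only [solution_alt, hri, Option.getD_some]
        rw [if_neg (by omega), if_neg (by omega)]
      · have h1 : acc ++ s :: rest = (acc ++ [s]) ++ rest := by simp
        have hA : solGo (acc ++ s :: rest) acc (s :: rest) =
            solGo (acc ++ s :: rest) (acc ++ [s]) rest := by
          simp [solGo, hsl, hsr]
        rw [hA, h1]
        exact ih (acc ++ [s])
          (by intro hm; rcases List.mem_append.mp hm with h | h
              · exact hl h
              · simp at h; exact hsl h.symm)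
          (by intro hm; rcases List.mem_append.mp hm with h | h
              · exact hr h
              · simp at h; exact hsr h.symm)

-- ===== VERDICT (by name: the statement is the Claim_ definition above) =====
theorem solution_spec : Claim_equal_solution := by
  intro str_list _
  unfold Spec_solution solution
  simpa using main_lemma str_list [] (by simp) (by simp)
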